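-- pv_equiv track=rewrite | github.com/Aryasb-art/superagi.aria | superagi/agents/aria_agents/aria_emotion_agent/aria_emotion_agent.py | _determine_mood_trend
-- ===== SOURCE A (Python) =====
-- from typing import List, Dict, Any, Optional, Tuple
--
-- def _determine_mood_trend(recent_emotions: List[str]) -> str:
--     """Determine overall mood trend from recent emotions"""
--     if not recent_emotions:
--         return "insufficient_data"
--
--     positive_emotions = ['joy', 'excitement', 'trust', 'anticipation']
--     negative_emotions = ['sadness', 'anger', 'fear', 'disgust']
--
--     positive_count = sum(1 for emotion in recent_emotions if emotion in positive_emotions)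
--     negative_count = sum(1 for emotion in recent_emotions if emotion in negative_emotions)
--
--     if positive_count > negative_count:
--         return "positive_trend"
--     elif negative_count > positive_count:
--         return "negative_trend"
--     else:
--         return "stable_trend"
-- ===== SOURCE B (Python) =====
-- def _determine_mood_trend(recent_emotions):
--     """Determine overall mood trend from recent emotions"""
--     if not recent_emotions:
--         return "insufficient_data"
--
--     delta = {'joy': 1, 'excitement': 1, 'trust': 1, 'anticipation': 1,
--              'sadness': -1, 'anger': -1, 'fear': -1, 'disgust': -1}
--
--     score = 0
--     for emotion in recent_emotions:
--         score += delta.get(emotion, 0)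
--
--     if score > 0:
--         return "positive_trend"
--     if score < 0:
--         return "negative_trend"
--     return "stable_trend"
-- ===== Notes on version B (the rewrite author's own statement) =====
-- stated objective: simpler
-- what changed: Replaces the two separate membership-count passes over recent_emotions with a single pass maintaining one net score via a +1/-1 delta dictionary lookup, then classifies by the sign of the score.
import Mathlib
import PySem

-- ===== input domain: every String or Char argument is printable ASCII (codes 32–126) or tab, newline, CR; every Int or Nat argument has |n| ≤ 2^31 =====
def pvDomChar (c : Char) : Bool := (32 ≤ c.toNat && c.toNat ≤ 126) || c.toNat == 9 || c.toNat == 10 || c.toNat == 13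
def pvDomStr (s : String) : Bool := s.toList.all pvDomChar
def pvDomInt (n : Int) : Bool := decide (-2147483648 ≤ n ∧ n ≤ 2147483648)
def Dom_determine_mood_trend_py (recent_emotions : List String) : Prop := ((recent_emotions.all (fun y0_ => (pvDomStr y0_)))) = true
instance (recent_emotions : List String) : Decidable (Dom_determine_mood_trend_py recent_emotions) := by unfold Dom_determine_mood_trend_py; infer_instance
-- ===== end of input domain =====

-- ===== PORT A =====
-- B: one pass with a net-score accumulator and a delta dictionary instead of two count passes (simpler).
def determine_mood_trend_py (recent_emotions : List String) : String :=
  if recent_emotions = [] then "insufficient_data"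
  else
    let positive_emotions : List String := ["joy", "excitement", "trust", "anticipation"]
    let negative_emotions : List String := ["sadness", "anger", "fear", "disgust"]
    let positive_count : Int := recent_emotions.foldl
      (fun acc emotion => if positive_emotions.contains emotion then acc + 1 else acc) 0
    let negative_count : Int := recent_emotions.foldl
      (fun acc emotion => if negative_emotions.contains emotion then acc + 1 else acc) 0
    if positive_count > negative_count then "positive_trend"
    else if negative_count > positive_count then "negative_trend"
    else "stable_trend"

-- ===== PORT B =====
def pvDelta : PySem.Dict String Int :=
  PySem.Dict.ofList [("joy", 1), ("excitement", 1), ("trust", 1), ("anticipation", 1),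
                     ("sadness", -1), ("anger", -1), ("fear", -1), ("disgust", -1)]

def determine_mood_trend_py_alt (recent_emotions : List String) : String :=
  if recent_emotions = [] then "insufficient_data"
  else
    let score : Int := recent_emotions.foldl (fun s emotion => s + pvDelta.getD emotion 0) 0
    if score > 0 then "positive_trend"
    else if score < 0 then "negative_trend"
    else "stable_trend"

-- ===== PRECONDITION & SPEC =====
def Spec_determine_mood_trend_py (recent_emotions : List String) (out : String) : Prop := out = determine_mood_trend_py_alt recent_emotions
instance (recent_emotions : List String) (out : String) : Decidable (Spec_determine_mood_trend_py recent_emotions out) := by unfold Spec_determine_mood_trend_py; infer_instance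

-- ===== CLAIM (what is proved, stated in full; the proofs are below) =====
def Claim_equal_determine_mood_trend_py : Prop := ∀ (recent_emotions : List String), Dom_determine_mood_trend_py recent_emotions → Spec_determine_mood_trend_py recent_emotions (determine_mood_trend_py recent_emotions)

-- ===== LEMMAS AND PROOFS =====

-- ===== VERDICT (by name: the statement is the Claim_ definition above) =====
-- per-element delta law: the dict delta is the positive indicator minus the negative indicator
lemma pvDelta_getD (e : String) :
    pvDelta.getD e 0 =
      (if (["joy", "excitement", "trust", "anticipation"] : List String).contains e then (1 : Int) else 0)
        - (if (["sadness", "anger", "fear", "disgust"] : List String).contains e then (1 : Int) else 0) := by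
  simp only [pvDelta, PySem.Dict.ofList, PySem.Dict.update, List.foldl_cons, List.foldl_nil,
    PySem.Dict.getD_insert, PySem.Dict.getD_empty, List.contains_cons, List.contains_nil]
  split_ifs <;> simp_all

-- loop fusion: the net-score fold equals the difference of the two count folds
lemma score_eq_counts (xs : List String) : ∀ p n : Int,
    xs.foldl (fun s emotion => s + pvDelta.getD emotion 0) (p - n) =
      xs.foldl (fun acc emotion =>
          if (["joy", "excitement", "trust", "anticipation"] : List String).contains emotion
          then acc + 1 else acc) p
        - xs.foldl (fun acc emotion =>
          if (["sadness", "anger", "fear", "disgust"] : List String).contains emotion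
          then acc + 1 else acc) n := by
  induction xs with
  | nil => intro p n; simp
  | cons e xs ih =>
    intro p n
    simp only [List.foldl_cons]
    have hd : p - n + pvDelta.getD e 0 =
        (if (["joy", "excitement", "trust", "anticipation"] : List String).contains e then p + 1 else p)
          - (if (["sadness", "anger", "fear", "disgust"] : List String).contains e then n + 1 else n) := by
      rw [pvDelta_getD]; split_ifs <;> omega
    rw [hd]
    exact ih _ _

theorem determine_mood_trend_py_spec : Claim_equal_determine_mood_trend_py := by
  intro xs _
  unfold Spec_determine_mood_trend_py determine_mood_trend_py determine_mood_trend_py_alt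
  by_cases h : xs = []
  · simp [h]
  · simp only [if_neg h]
    have := score_eq_counts xs 0 0
    simp only [sub_zero] at this
    rw [this]
    split_ifs <;> first | rfl | omega
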